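-- pv_equiv track=rewrite | github.com/Ksenia2075/Python_HW_2022 | homework3/task3_5.py | neg_fib
-- ===== SOURCE A (Python) =====
-- def neg_fib(num: int):
--     a, b = 1, 1
--     list = [0]
--     for i in range(num):
--         list.append(a)
--         list.insert(0, a * (-1) ** i)
--         a, b = b, b + a
--     return list
-- ===== SOURCE B (Python) =====
-- def neg_fib(num: int):
--     fibs = []
--     a, b = 1, 1
--     for _ in range(num):
--         fibs.append(a)
--         a, b = b, b + a
--     front = [fibs[i] * (-1) ** i for i in range(num - 1, -1, -1)]
--     return front + [0] + fibs
-- ===== Notes on version B (the rewrite author's own statement) =====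
-- stated objective: simpler
-- what changed: Replaces A's single interleaved loop with O(n) front inserts and leftover-state sign tracking by two plain passes: build the Fibonacci table once, then mirror it with alternating signs by a reverse-indexed comprehension, and concatenate front + [0] + table.
import Mathlib
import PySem

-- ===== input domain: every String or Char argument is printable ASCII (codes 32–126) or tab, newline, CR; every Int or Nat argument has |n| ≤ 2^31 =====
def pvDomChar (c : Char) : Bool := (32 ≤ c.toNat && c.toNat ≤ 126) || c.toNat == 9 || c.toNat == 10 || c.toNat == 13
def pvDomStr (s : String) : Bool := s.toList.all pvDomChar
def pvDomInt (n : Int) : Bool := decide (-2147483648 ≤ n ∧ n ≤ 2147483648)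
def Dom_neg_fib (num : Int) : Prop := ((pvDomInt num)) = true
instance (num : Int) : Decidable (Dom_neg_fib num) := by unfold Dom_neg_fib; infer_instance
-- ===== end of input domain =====

-- B builds the Fibonacci table in one pass and mirrors it with alternating signs by a
-- reverse-indexed pass, instead of A's interleaved loop with a front insert each iteration. (simpler)

-- ===== PORT A =====
def neg_fib (num : Int) : List Int :=
  ((PySem.List.pyRange 0 num 1).foldl
      (fun (st : Int × Int × List Int) i =>
        (st.2.1, st.2.1 + st.1, (st.1 * (-1) ^ i.toNat) :: (st.2.2 ++ [st.1])))
      (1, 1, [0])).2.2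

-- ===== PORT B =====
def neg_fib_alt (num : Int) : List Int :=
  let fibs := ((PySem.List.pyRange 0 num 1).foldl
      (fun (st : Int × Int × List Int) _ => (st.2.1, st.2.1 + st.1, st.2.2 ++ [st.1]))
      (1, 1, [])).2.2
  let front := (PySem.List.pyRange (num - 1) (-1) (-1)).map
      (fun i => PySem.List.pyGetD fibs i 0 * (-1) ^ i.toNat)
  front ++ [0] ++ fibs

-- ===== PRECONDITION & SPEC =====
def Spec_neg_fib (num : Int) (out : List Int) : Prop := out = neg_fib_alt num
instance (num : Int) (out : List Int) : Decidable (Spec_neg_fib num out) := by unfold Spec_neg_fib; infer_instance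

-- ===== CLAIM (what is proved, stated in full; the proofs are below) =====
def Claim_equal_neg_fib : Prop := ∀ (num : Int), Dom_neg_fib num → Spec_neg_fib num (neg_fib num)

-- ===== LEMMAS AND PROOFS =====

-- Fibonacci reference (1, 1, 2, 3, 5, …) used only by the proofs.
def fibf : Nat → Int
  | 0 => 1
  | 1 => 1
  | n + 2 => fibf (n + 1) + fibf n

def fibsN (n : Nat) : List Int := (List.range n).map fibf

def frontN (n : Nat) : List Int :=
  ((List.range n).map (fun k => fibf k * (-1) ^ k)).reverse

lemma neg_fib_state (n : Nat) :
    (PySem.List.pyRange 0 (n : Int) 1).foldl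
      (fun (st : Int × Int × List Int) i =>
        (st.2.1, st.2.1 + st.1, (st.1 * (-1) ^ i.toNat) :: (st.2.2 ++ [st.1])))
      (1, 1, [0])
    = (fibf n, fibf (n + 1), frontN n ++ 0 :: fibsN n) := by
  induction n with
  | zero => simp [fibf, frontN, fibsN]
  | succ m ih =>
      rw [show ((m + 1 : Nat) : Int) = (m : Int) + 1 by push_cast; ring,
          PySem.List.pyRange_one_succ_right (by positivity),
          List.foldl_append, ih]
      simp [fibf, frontN, fibsN, List.range_succ, List.map_append]

lemma alt_fibs_state (n : Nat) :
    (PySem.List.pyRange 0 (n : Int) 1).foldl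
      (fun (st : Int × Int × List Int) _ => (st.2.1, st.2.1 + st.1, st.2.2 ++ [st.1]))
      (1, 1, [])
    = (fibf n, fibf (n + 1), fibsN n) := by
  induction n with
  | zero => simp [fibf, fibsN]
  | succ m ih =>
      rw [show ((m + 1 : Nat) : Int) = (m : Int) + 1 by push_cast; ring,
          PySem.List.pyRange_one_succ_right (by positivity),
          List.foldl_append, ih]
      simp [fibsN, List.range_succ]
      rw [show m + 1 + 1 = m + 2 from rfl, fibf]

lemma alt_front (n : Nat) :
    (PySem.List.pyRange ((n : Int) - 1) (-1) (-1)).map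
      (fun i => PySem.List.pyGetD (fibsN n) i 0 * (-1) ^ i.toNat)
    = frontN n := by
  rw [PySem.List.pyRange_neg_one_eq_reverse]
  have h1 : ((-1 : Int) + 1) = 0 := by ring
  have h2 : ((n : Int) - 1 + 1) = (n : Int) := by ring
  rw [h1, h2, List.map_reverse, frontN]
  congr 1
  rw [PySem.List.pyRange_one]
  simp only [sub_zero, Int.toNat_natCast, List.map_map]
  apply List.map_congr_left
  intro k hk
  simp only [Function.comp, zero_add]
  have hkn : k < n := List.mem_range.mp hk
  rw [PySem.List.pyGetD_natCast]
  simp [fibsN, List.getD, hkn]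

-- ===== VERDICT (by name: the statement is the Claim_ definition above) =====
theorem neg_fib_spec : Claim_equal_neg_fib := by
  intro num _
  unfold Spec_neg_fib neg_fib neg_fib_alt
  by_cases h : num ≤ 0
  · rw [PySem.List.pyRange_one_eq_nil h, PySem.List.pyRange_neg_one_eq_nil (by omega)]
    simp
  · push Not at h
    obtain ⟨n, rfl⟩ : ∃ n : Nat, num = (n : Int) := ⟨num.toNat, (Int.toNat_of_nonneg h.le).symm⟩
    rw [neg_fib_state, alt_fibs_state]
    simp only
    rw [alt_front]
    simp
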